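-- pv_equiv track=rewrite | github.com/lxsean88/alg101 | lint-daily/issplitableequal.py | issplitable
-- ===== SOURCE A (Python) =====
-- def issplitable(s: str) -> bool:
--     if not s or len(s) % 3 == 1:
--         return False
--
--     len2str = 0
--     count = 1
--     for i in range(1, len(s)):
--         if s[i] == s[i-1]:
--             if count == 3:
--                 count = 1
--             else:
--                 count += 1
--         else:
--             if count == 1:
--                 return False
--             elif count == 2:
--                 len2str += 1
--                 if len2str > 1:
--                     return False
--             count = 1
--
--     if count == 2:
--         len2str += 1
--     if count ==1 or len2str != 1:
--         return False
--
--     return True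
-- ===== SOURCE B (Python) =====
-- def issplitable(s: str) -> bool:
--     # build run-length table first, then check aggregates
--     runs = []
--     run = 0
--     prev = ''
--     for c in s:
--         if run and c == prev:
--             run += 1
--         else:
--             if run:
--                 runs.append(run)
--             run = 1
--             prev = c
--     if run:
--         runs.append(run)
--     if not runs:
--         return False
--     if any(r % 3 == 1 for r in runs):
--         return False
--     return sum(1 for r in runs if r % 3 == 2) == 1
-- ===== Notes on version B (the rewrite author's own statement) =====
-- stated objective: simpler
-- what changed: B first materializes the run-length table of consecutive equal characters in one pass, then decides by aggregate checks (no run length ≡ 1 mod 3, exactly one run length ≡ 2 mod 3), replacing A's interleaved per-character mod-3 state machine with early returns and its redundant length-mod-3 guard.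
import Mathlib
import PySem

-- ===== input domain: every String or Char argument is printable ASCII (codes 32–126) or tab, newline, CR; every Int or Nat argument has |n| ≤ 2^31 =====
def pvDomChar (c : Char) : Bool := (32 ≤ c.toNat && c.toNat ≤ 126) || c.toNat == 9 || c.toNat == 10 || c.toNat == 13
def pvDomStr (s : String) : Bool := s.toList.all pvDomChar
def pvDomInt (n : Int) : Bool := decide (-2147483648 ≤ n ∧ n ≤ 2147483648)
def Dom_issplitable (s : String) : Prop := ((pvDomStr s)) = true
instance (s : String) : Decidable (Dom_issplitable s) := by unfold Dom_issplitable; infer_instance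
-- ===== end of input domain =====

-- B replaces A's interleaved per-character state machine by a run-length table plus aggregate checks (objective: simpler).

-- ===== PORT A =====
-- A's for-loop: compares s[i] with s[i-1]; state (count, len2str); none = early `return False`
def issplitableLoop : Char → List Char → Int → Int → Option (Int × Int)
  | _, [], count, len2 => some (count, len2)
  | prev, c :: rest, count, len2 =>
    if c == prev then
      if count == 3 then issplitableLoop c rest 1 len2
      else issplitableLoop c rest (count + 1) len2
    else
      if count == 1 then none
      else if count == 2 then
        if len2 + 1 > 1 then none
        else issplitableLoop c rest 1 (len2 + 1)
      else issplitableLoop c rest 1 len2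

def issplitable (s : String) : Bool :=
  if s.toList.isEmpty || s.toList.length % 3 == 1 then false
  else
    match s.toList with
    | [] => false
    | c :: rest =>
      match issplitableLoop c rest 1 0 with
      | none => false
      | some (count, len2) =>
        let len2 := if count == 2 then len2 + 1 else len2
        if count == 1 || len2 != 1 then false else true

-- ===== PORT B =====
-- first pass of Source B: accumulate the run-length table (runs so far, current run length, prev char)
def runsLoop : List Char → List Int → Int → Char → List Int × Int
  | [], runs, run, _ => (runs, run)
  | c :: rest, runs, run, prev =>
    if run != 0 && c == prev then runsLoop rest runs (run + 1) prev
    else runsLoop rest (if run != 0 then runs ++ [run] else runs) 1 c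

def issplitable_alt (s : String) : Bool :=
  let p := runsLoop s.toList [] 0 ' '
  let runs := if p.2 != 0 then p.1 ++ [p.2] else p.1
  if runs.isEmpty then false
  else if runs.any (fun r => r % 3 == 1) then false
  else (runs.countP (fun r => r % 3 == 2)) == 1

-- ===== PRECONDITION & SPEC =====
def Spec_issplitable (s : String) (out : Bool) : Prop := out = issplitable_alt s
instance (s : String) (out : Bool) : Decidable (Spec_issplitable s out) := by unfold Spec_issplitable; infer_instance

-- ===== CLAIM (what is proved, stated in full; the proofs are below) =====
def Claim_equal_issplitable : Prop := ∀ (s : String), Dom_issplitable s → Spec_issplitable s (issplitable s)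

-- ===== LEMMAS AND PROOFS =====

-- canonical run lengths of prev::l, the current run having length n already
def runsC : Char → Int → List Char → List Int
  | _, n, [] => [n]
  | prev, n, c :: rest => if c == prev then runsC prev (n + 1) rest else n :: runsC c 1 rest

-- A's postlude after the loop
def postA (count len2 : Int) : Bool :=
  let len2 := if count == 2 then len2 + 1 else len2
  if count == 1 || len2 != 1 then false else true

-- A's loop result followed by A's postlude
def aRes (prev : Char) (l : List Char) (count len2 : Int) : Bool :=
  (issplitableLoop prev l count len2).elim false (fun p => postA p.1 p.2)

-- B's aggregate check, with len2 completed "≡2 (mod 3)" runs already accounted for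
def chkCtx (len2 : Int) (rs : List Int) : Bool :=
  !(rs.any (fun r => r % 3 == 1)) && (len2 + (rs.countP (fun r => r % 3 == 2) : Int) == 1)

lemma runsC_ne_nil (prev : Char) (n : Int) (l : List Char) : runsC prev n l ≠ [] := by
  cases l with
  | nil => simp [runsC]
  | cons c rest => simp only [runsC]; split <;> simp [runsC_ne_nil]

lemma runsC_map_mod (l : List Char) : ∀ (prev : Char) (n m : Int), n % 3 = m % 3 →
    (runsC prev n l).map (· % 3) = (runsC prev m l).map (· % 3) := by
  induction l with
  | nil => intro prev n m h; simp [runsC, h]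
  | cons c rest ih =>
    intro prev n m h
    simp only [runsC]
    split
    · exact ih prev (n + 1) (m + 1) (by omega)
    · simp [h]

lemma chkCtx_congr (len2 : Int) (rs rs' : List Int)
    (h : rs.map (· % 3) = rs'.map (· % 3)) : chkCtx len2 rs = chkCtx len2 rs' := by
  have hany : rs.any (fun r => r % 3 == 1) = rs'.any (fun r => r % 3 == 1) := by
    have := congrArg (List.any · (fun r => r == 1)) h
    simpa [List.any_map, Function.comp] using this
  have hcnt : rs.countP (fun r => r % 3 == 2) = rs'.countP (fun r => r % 3 == 2) := by
    have := congrArg (List.countP (fun r => r == 2)) h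
    simpa [List.countP_map, Function.comp] using this
  simp [chkCtx, hany, hcnt]

lemma aRes_eq_chkCtx (l : List Char) : ∀ (prev : Char) (count len2 : Int),
    (count = 1 ∨ count = 2 ∨ count = 3) → 0 ≤ len2 →
    aRes prev l count len2 = chkCtx len2 (runsC prev count l) := by
  induction l with
  | nil =>
    intro prev count len2 hc hl
    rcases hc with h | h | h <;> subst h <;>
      simp [aRes, issplitableLoop, postA, runsC, chkCtx, bne_iff_ne, beq_eq_decide]
  | cons c rest ih =>
    intro prev count len2 hc hl
    by_cases hcp : (c == prev) = true
    · have hc' : c = prev := by simpa using hcp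
      rcases hc with h | h | h <;> subst h
      · have step : aRes prev (c :: rest) 1 len2 = aRes c rest 2 len2 := by
          simp [aRes, issplitableLoop, hcp]
        rw [step, ih c 2 len2 (by omega) hl, hc']
        simp [runsC, show (1:Int) + 1 = 2 from rfl]
      · have step : aRes prev (c :: rest) 2 len2 = aRes c rest 3 len2 := by
          simp [aRes, issplitableLoop, hcp]
        rw [step, ih c 3 len2 (by omega) hl, hc']
        simp [runsC, show (2:Int) + 1 = 3 from rfl]
      · have step : aRes prev (c :: rest) 3 len2 = aRes c rest 1 len2 := by
          simp [aRes, issplitableLoop, hcp]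
        rw [step, ih c 1 len2 (by omega) hl, hc']
        have hr : runsC prev 3 (prev :: rest) = runsC prev 4 rest := by
          simp [runsC, show (3:Int) + 1 = 4 from rfl]
        rw [hr]
        exact chkCtx_congr len2 _ _ (runsC_map_mod rest prev 1 4 (by norm_num))
    · rcases hc with h | h | h <;> subst h
      · -- count = 1 at a boundary: A returns False; the head run is ≡ 1 (mod 3)
        have step : aRes prev (c :: rest) 1 len2 = false := by
          simp [aRes, issplitableLoop, hcp]
        rw [step]
        simp [runsC, hcp, chkCtx]
      · -- count = 2 at a boundary
        rw [show runsC prev 2 (c :: rest) = 2 :: runsC c 1 rest from by simp [runsC, hcp]]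
        by_cases hl2 : len2 + 1 > 1
        · have step : aRes prev (c :: rest) 2 len2 = false := by
            simp [aRes, issplitableLoop, hcp, hl2]
          rw [step]
          simp only [chkCtx]
          simp
          intro _
          omega
        · have hl0 : len2 = 0 := by omega
          subst hl0
          have step : aRes prev (c :: rest) 2 0 = aRes c rest 1 1 := by
            simp [aRes, issplitableLoop, hcp]
          rw [step, ih c 1 1 (by omega) (by omega)]
          simp only [chkCtx, List.any_cons, List.countP_cons,
            show ((2:Int) % 3 == 1) = false from rfl, show ((2:Int) % 3 == 2) = true from rfl,
            Bool.false_or]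
          congr 1
          rw [beq_eq_decide, beq_eq_decide, decide_eq_decide]
          push_cast
          omega
      · -- count = 3 at a boundary: the head run is ≡ 0 (mod 3), invisible to the check
        have step : aRes prev (c :: rest) 3 len2 = aRes c rest 1 len2 := by
          simp [aRes, issplitableLoop, hcp]
        rw [step, ih c 1 len2 (by omega) hl]
        rw [show runsC prev 3 (c :: rest) = 3 :: runsC c 1 rest from by simp [runsC, hcp]]
        simp [chkCtx]

lemma runsLoop_finish (l : List Char) : ∀ (runs : List Int) (run : Int) (prev : Char),
    1 ≤ run →
    (let p := runsLoop l runs run prev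
     if p.2 != 0 then p.1 ++ [p.2] else p.1) = runs ++ runsC prev run l := by
  induction l with
  | nil =>
    intro runs run prev hr
    simp only [runsLoop, runsC]
    rw [if_pos (by simp [bne_iff_ne]; omega)]
  | cons c rest ih =>
    intro runs run prev hr
    by_cases hcp : (c == prev) = true
    · have hrun : (run != 0) = true := by simp [bne_iff_ne]; omega
      simp only [runsLoop, hrun, hcp, Bool.and_self, reduceIte, runsC]
      exact ih runs (run + 1) prev (by omega)
    · have hrun : (run != 0) = true := by simp [bne_iff_ne]; omega
      simp only [runsLoop, hrun, hcp, Bool.and_false, Bool.false_eq_true, reduceIte, runsC]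
      rw [ih (runs ++ [run]) 1 c (by omega)]
      simp

lemma runsC_sum (l : List Char) : ∀ (prev : Char) (n : Int),
    (runsC prev n l).sum = n + l.length := by
  induction l with
  | nil => intro prev n; simp [runsC]
  | cons c rest ih =>
    intro prev n
    simp only [runsC]
    split
    · rw [ih]; simp; omega
    · simp [List.sum_cons, ih]; omega

lemma chk_sum (rs : List Int) (h : rs.any (fun r => r % 3 == 1) = false) :
    rs.sum % 3 = (2 * (rs.countP (fun r => r % 3 == 2) : Int)) % 3 := by
  induction rs with
  | nil => simp
  | cons r rest ih =>
    simp only [List.any_cons, Bool.or_eq_false_iff] at h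
    have h1 : r % 3 ≠ 1 := by simpa [beq_iff_eq] using h.1
    have ih' := ih h.2
    simp only [List.sum_cons, List.countP_cons]
    by_cases h2 : (r % 3 == 2) = true
    · have hr2 : r % 3 = 2 := by simpa [beq_iff_eq] using h2
      simp only [h2, reduceIte]
      push_cast
      omega
    · have h0 : r % 3 = 0 := by
        simp [beq_iff_eq] at h2
        omega
      simp only [h2]
      push_cast
      omega

-- B on a string whose char list is nonempty equals the canonical check
lemma alt_cons (s : String) (c : Char) (rest : List Char) (hs : s.toList = c :: rest) :
    issplitable_alt s = chkCtx 0 (runsC c 1 rest) := by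
  have h0 : runsLoop (c :: rest) [] 0 ' ' = runsLoop rest [] 1 c := by
    simp [runsLoop]
  have hfin := runsLoop_finish rest ([] : List Int) 1 c (by omega)
  simp only at hfin
  simp only [issplitable_alt, hs, h0, hfin, List.nil_append]
  rw [if_neg (by simp [runsC_ne_nil])]
  simp only [chkCtx]
  by_cases hany : (runsC c 1 rest).any (fun r => r % 3 == 1) = true
  · simp [hany]
  · simp only [Bool.not_eq_true] at hany
    simp only [hany, Bool.false_eq_true, reduceIte, Bool.not_false, Bool.true_and]
    rw [beq_eq_decide, beq_eq_decide, decide_eq_decide]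
    omega

theorem issplitable_spec : Claim_equal_issplitable := by
  unfold Claim_equal_issplitable
  intro s _
  unfold Spec_issplitable
  cases hl : s.toList with
  | nil =>
    simp [issplitable, issplitable_alt, hl, runsLoop]
  | cons c rest =>
    rw [alt_cons s c rest hl]
    by_cases hg : ((c :: rest).length % 3 == 1) = true
    · -- A's redundant length guard: the check is false anyway (sum of runs ≡ 2 mod 3 when it holds)
      have hg' : (rest.length + 1) % 3 = 1 := by
        have := beq_iff_eq.mp hg
        simpa using this
      have hA : issplitable s = false := by
        simp only [issplitable, hl]
        rw [if_pos (by simp [hg'])]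
      rw [hA]
      by_contra hne
      have htrue : chkCtx 0 (runsC c 1 rest) = true := by
        cases h : chkCtx 0 (runsC c 1 rest) <;> simp_all
      simp only [chkCtx, Bool.and_eq_true, Bool.not_eq_eq_eq_not, Bool.not_true] at htrue
      obtain ⟨hany, hcnt⟩ := htrue
      have hcnt' : ((runsC c 1 rest).countP (fun r => r % 3 == 2) : Int) = 1 := by
        rw [beq_eq_decide, decide_eq_true_eq] at hcnt
        omega
      have hsum := chk_sum _ (by simpa using hany)
      rw [runsC_sum, hcnt'] at hsum
      have hlen : (c :: rest).length % 3 = 1 := beq_iff_eq.mp hg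
      simp only [List.length_cons] at hlen
      omega
    · have hA : issplitable s = aRes c rest 1 0 := by
        simp only [issplitable, hl]
        rw [if_neg (by simp_all)]
        cases h : issplitableLoop c rest 1 0 with
        | none => simp [aRes, h]
        | some p => cases p; simp [aRes, h, postA]
      rw [hA, aRes_eq_chkCtx rest c 1 0 (by omega) (by omega)]
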